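-- pv_equiv track=rewrite | github.com/ajaymin28/paligemma-video | utils/utilities.py | calculate_accuracy_varying_lengths
-- ===== SOURCE A (Python) =====
-- def calculate_accuracy_varying_lengths(gt_triplets, pred_triplets, remove_duplicates=True):
--     """
--     Calculate accuracy for scene graph triplets and their individual components
--     when the counts of ground truth and predicted triplets are not the same.
--
--     :param gt_triplets: List of ground truth triplets [(subject, predicate, object), ...]
--     :param pred_triplets: List of predicted triplets [(subject, predicate, object), ...]
--     :return: A dictionary containing the accuracies for triplets, subjects, predicates, and objects
--     """
--
--     if remove_duplicates:
--         gt_set = set(gt_triplets)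
--         pred_set = set(pred_triplets)
--         correct_triplets = gt_set & pred_set  # Intersection of both sets gives correct triplets
--     else:
--         correct_triplets = 0
--         for predt in pred_triplets:
--             if predt in gt_triplets:
--                 correct_triplets +=1
--
--
--     total_triplets = len(gt_triplets)
--     total_predicted_triplets = len(pred_triplets)
--
--     correct_subjects = sum(1 for gt in gt_triplets if any(gt[0] == pred[0] for pred in pred_triplets))
--     correct_predicates = sum(1 for gt in gt_triplets if any(gt[1] == pred[1] for pred in pred_triplets))
--     correct_objects = sum(1 for gt in gt_triplets if any(gt[2] == pred[2] for pred in pred_triplets))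
--
--     unique_subjects = list(set([gt[0] for gt in gt_triplets]))
--     unique_predicates = list(set([gt[1] for gt in gt_triplets]))
--     unique_objects = list(set([gt[2] for gt in gt_triplets]))
--     total_pred_predicates = list(set([pred[1] for pred in pred_triplets]))
--
--     # triplet_accuracy = len(correct_triplets) / total_triplets if total_triplets > 0 else 0
--     # subject_accuracy = correct_subjects / total_triplets if total_triplets > 0 else 0
--     # predicate_accuracy = correct_predicates / total_triplets if total_triplets > 0 else 0
--     # object_accuracy = correct_objects / total_triplets if total_triplets > 0 else 0
--
--
--     if type(correct_triplets)==list or type(correct_triplets)==set: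
--         correct_triplets = len(correct_triplets)
--
--     return {
--         'correct_triplet_cnt': correct_triplets,
--         'correct_subject_cnt': correct_subjects,
--         'correct_predicate_cnt': correct_predicates,
--         'correct_object_cnt': correct_objects,
--         'total_triplets': total_triplets,
--         'total_subjects': len(unique_subjects),
--         'total_objects': len(unique_objects),
--         'total_predicates': len(unique_predicates),
--         'total_pred_predicates': len(total_pred_predicates),
--         'total_predicted_triplets': total_predicted_triplets
--     }
-- ===== SOURCE B (Python) =====
-- def _counter(items):
--     c = {}
--     for x in items:
--         c[x] = c.get(x, 0) + 1
--     return c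
--
--
-- def calculate_accuracy_varying_lengths(gt_triplets, pred_triplets, remove_duplicates=True):
--     # Histogram/group-by strategy: count multiplicities of each distinct component
--     # and triplet once, then aggregate per distinct value instead of testing each
--     # gt element against the predictions.
--     gt_sub = _counter(g[0] for g in gt_triplets)
--     gt_prd = _counter(g[1] for g in gt_triplets)
--     gt_obj = _counter(g[2] for g in gt_triplets)
--     pred_sub = _counter(p[0] for p in pred_triplets)
--     pred_prd = _counter(p[1] for p in pred_triplets)
--     pred_obj = _counter(p[2] for p in pred_triplets)
--     gt_trip = _counter(gt_triplets)
--     pred_trip = _counter(pred_triplets)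
--
--     if remove_duplicates:
--         correct_triplets = sum(1 for t in gt_trip if t in pred_trip)
--     else:
--         correct_triplets = sum(c for t, c in pred_trip.items() if t in gt_trip)
--
--     correct_subjects = sum(c for s, c in gt_sub.items() if s in pred_sub)
--     correct_predicates = sum(c for s, c in gt_prd.items() if s in pred_prd)
--     correct_objects = sum(c for s, c in gt_obj.items() if s in pred_obj)
--
--     return {
--         'correct_triplet_cnt': correct_triplets,
--         'correct_subject_cnt': correct_subjects,
--         'correct_predicate_cnt': correct_predicates,
--         'correct_object_cnt': correct_objects,
--         'total_triplets': len(gt_triplets),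
--         'total_subjects': len(gt_sub),
--         'total_objects': len(gt_obj),
--         'total_predicates': len(gt_prd),
--         'total_pred_predicates': len(pred_prd),
--         'total_predicted_triplets': len(pred_triplets),
--     }
-- ===== Notes on version B (the rewrite author's own statement) =====
-- stated objective: faster
-- what changed: Replaces A's per-element nested scans with a histogram/group-by strategy: build frequency dicts of every component and triplet once, then compute each count by summing multiplicities over the distinct keys shared with the other side's dict.
import Mathlib
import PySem

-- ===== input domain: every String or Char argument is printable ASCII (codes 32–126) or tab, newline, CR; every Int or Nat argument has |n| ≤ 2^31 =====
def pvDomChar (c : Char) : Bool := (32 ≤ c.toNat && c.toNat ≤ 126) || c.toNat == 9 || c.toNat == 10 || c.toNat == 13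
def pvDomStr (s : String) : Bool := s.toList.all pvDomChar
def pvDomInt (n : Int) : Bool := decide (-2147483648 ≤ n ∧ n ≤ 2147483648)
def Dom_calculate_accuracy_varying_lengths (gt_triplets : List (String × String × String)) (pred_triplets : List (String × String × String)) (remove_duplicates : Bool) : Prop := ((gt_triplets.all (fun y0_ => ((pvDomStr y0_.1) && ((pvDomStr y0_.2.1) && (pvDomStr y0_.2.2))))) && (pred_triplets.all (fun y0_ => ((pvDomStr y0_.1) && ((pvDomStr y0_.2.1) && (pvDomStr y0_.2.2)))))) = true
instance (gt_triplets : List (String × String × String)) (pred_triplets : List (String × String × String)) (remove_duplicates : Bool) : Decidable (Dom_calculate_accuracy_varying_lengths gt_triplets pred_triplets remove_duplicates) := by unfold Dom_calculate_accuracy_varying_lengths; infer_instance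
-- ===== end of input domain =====

-- B replaces A's per-element nested scans by a histogram (group-by) strategy: frequency
-- dicts of each component/triplet built once, counts obtained by summing multiplicities
-- over shared distinct keys (faster in a timing run's measure on large inputs).

-- ===== PORT A =====
def calculate_accuracy_varying_lengths (gt_triplets : List (String × String × String)) (pred_triplets : List (String × String × String)) (remove_duplicates : Bool) : List (String × Int) :=
  -- if remove_duplicates: len(set(gt) & set(pred)); else: loop counting pred triplets in gt
  let correct_triplets : Int :=
    if remove_duplicates then
      ((PySem.Set.inter (PySem.Set.ofList gt_triplets) (PySem.Set.ofList pred_triplets)).length : Int)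
    else
      pred_triplets.foldl (fun acc predt => if predt ∈ gt_triplets then acc + 1 else acc) 0
  let total_triplets : Int := gt_triplets.length
  let total_predicted_triplets : Int := pred_triplets.length
  -- sum(1 for gt in gt_triplets if any(gt[k] == pred[k] for pred in pred_triplets))
  let correct_subjects : Int := gt_triplets.countP (fun g => pred_triplets.any (fun p => g.1 == p.1))
  let correct_predicates : Int := gt_triplets.countP (fun g => pred_triplets.any (fun p => g.2.1 == p.2.1))
  let correct_objects : Int := gt_triplets.countP (fun g => pred_triplets.any (fun p => g.2.2 == p.2.2))
  let unique_subjects : PySem.Set String := PySem.Set.ofList (gt_triplets.map (·.1))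
  let unique_predicates : PySem.Set String := PySem.Set.ofList (gt_triplets.map (·.2.1))
  let unique_objects : PySem.Set String := PySem.Set.ofList (gt_triplets.map (·.2.2))
  let total_pred_predicates : PySem.Set String := PySem.Set.ofList (pred_triplets.map (·.2.1))
  [("correct_triplet_cnt", correct_triplets),
   ("correct_subject_cnt", correct_subjects),
   ("correct_predicate_cnt", correct_predicates),
   ("correct_object_cnt", correct_objects),
   ("total_triplets", total_triplets),
   ("total_subjects", (unique_subjects.length : Int)),
   ("total_objects", (unique_objects.length : Int)),
   ("total_predicates", (unique_predicates.length : Int)),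
   ("total_pred_predicates", (total_pred_predicates.length : Int)),
   ("total_predicted_triplets", total_predicted_triplets)]

-- ===== PORT B =====
-- Source B's _counter: c = {}; for x in items: c[x] = c.get(x, 0) + 1
def pvCounter {α : Type} [BEq α] (xs : List α) : PySem.Dict α Int :=
  xs.foldl (fun d x => d.insert x (d.getD x 0 + 1)) PySem.Dict.empty

def calculate_accuracy_varying_lengths_alt (gt_triplets : List (String × String × String)) (pred_triplets : List (String × String × String)) (remove_duplicates : Bool) : List (String × Int) :=
  let gt_sub := pvCounter (gt_triplets.map (·.1))
  let gt_prd := pvCounter (gt_triplets.map (·.2.1))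
  let gt_obj := pvCounter (gt_triplets.map (·.2.2))
  let pred_sub := pvCounter (pred_triplets.map (·.1))
  let pred_prd := pvCounter (pred_triplets.map (·.2.1))
  let pred_obj := pvCounter (pred_triplets.map (·.2.2))
  let gt_trip := pvCounter gt_triplets
  let pred_trip := pvCounter pred_triplets
  let correct_triplets : Int :=
    if remove_duplicates then
      -- sum(1 for t in gt_trip if t in pred_trip)
      ((gt_trip.keys.filter (fun t => pred_trip.contains t)).length : Int)
    else
      -- sum(c for t, c in pred_trip.items() if t in gt_trip)
      ((pred_trip.items.filter (fun p => gt_trip.contains p.1)).map (·.2)).sum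
  let correct_subjects : Int := ((gt_sub.items.filter (fun p => pred_sub.contains p.1)).map (·.2)).sum
  let correct_predicates : Int := ((gt_prd.items.filter (fun p => pred_prd.contains p.1)).map (·.2)).sum
  let correct_objects : Int := ((gt_obj.items.filter (fun p => pred_obj.contains p.1)).map (·.2)).sum
  [("correct_triplet_cnt", correct_triplets),
   ("correct_subject_cnt", correct_subjects),
   ("correct_predicate_cnt", correct_predicates),
   ("correct_object_cnt", correct_objects),
   ("total_triplets", (gt_triplets.length : Int)),
   ("total_subjects", (gt_sub.size : Int)),
   ("total_objects", (gt_obj.size : Int)),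
   ("total_predicates", (gt_prd.size : Int)),
   ("total_pred_predicates", (pred_prd.size : Int)),
   ("total_predicted_triplets", (pred_triplets.length : Int))]

-- ===== PRECONDITION & SPEC =====
def Spec_calculate_accuracy_varying_lengths (gt_triplets : List (String × String × String)) (pred_triplets : List (String × String × String)) (remove_duplicates : Bool) (out : List (String × Int)) : Prop := out = calculate_accuracy_varying_lengths_alt gt_triplets pred_triplets remove_duplicates
instance (gt_triplets : List (String × String × String)) (pred_triplets : List (String × String × String)) (remove_duplicates : Bool) (out : List (String × Int)) : Decidable (Spec_calculate_accuracy_varying_lengths gt_triplets pred_triplets remove_duplicates out) := by unfold Spec_calculate_accuracy_varying_lengths; infer_instance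

-- ===== CLAIM (what is proved, stated in full; the proofs are below) =====
def Claim_equal_calculate_accuracy_varying_lengths : Prop := ∀ (gt_triplets : List (String × String × String)) (pred_triplets : List (String × String × String)) (remove_duplicates : Bool), Dom_calculate_accuracy_varying_lengths gt_triplets pred_triplets remove_duplicates → Spec_calculate_accuracy_varying_lengths gt_triplets pred_triplets remove_duplicates (calculate_accuracy_varying_lengths gt_triplets pred_triplets remove_duplicates)

-- ===== LEMMAS AND PROOFS =====

-- the filtered multiplicity-sum over a counter's items IS a countP over the underlying list
theorem pv_sum_counter {α : Type} [BEq α] [LawfulBEq α] [DecidableEq α] (xs : List α) (q : α → Bool) :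
    (((PySem.Dict.counter xs).items.filter (fun p => q p.1)).map (·.2)).sum = (xs.countP q : Int) := by
  rw [PySem.Dict.items_counter, List.filter_map, List.map_map]
  have hperm : ((PySem.Set.ofList xs).filter q).Perm (xs.dedup.filter q) :=
    (((List.perm_ext_iff_of_nodup (PySem.Set.nodup_ofList xs) xs.nodup_dedup).2
      (by intro a; simp [PySem.Set.mem_ofList, List.mem_dedup])).filter q)
  have hq : ((fun p => q p.1) ∘ fun k => (k, ((xs.count k : Nat) : Int))) = q := rfl
  have hv : ((·.2) ∘ fun k => (k, ((xs.count k : Nat) : Int)))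
      = (fun k => ((xs.count k : Nat) : Int)) := rfl
  rw [hq, hv, (hperm.map _).sum_eq]
  rw [show (fun k => ((xs.count k : Nat) : Int)) = (Nat.cast ∘ fun k => xs.count k) from rfl,
    ← List.map_map, ← Nat.cast_list_sum]
  have hc : (fun k => xs.count k) = (fun k => @List.count α instBEqOfDecidableEq k xs) := by
    funext k
    simp only [List.count_eq_countP]
    refine List.countP_congr ?_
    intro x _; simp
  rw [hc, List.sum_map_count_dedup_filter_eq_countP]

-- one component column: B's histogram sum = A's nested-scan countP
theorem pv_component (gt pred : List (String × String × String)) (f : (String × String × String) → String) :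
    (((PySem.Dict.counter (gt.map f)).items.filter
        (fun p => (PySem.Dict.counter (pred.map f)).contains p.1)).map (·.2)).sum
      = ((gt.countP (fun g => pred.any (fun p => f g == f p)) : Nat) : Int) := by
  rw [pv_sum_counter, List.countP_map]
  congr 1
  refine List.countP_congr ?_
  intro g _
  simp only [Function.comp_apply, PySem.Dict.contains_counter, List.contains_eq_mem,
    List.any_eq_true, List.mem_map, decide_eq_true_eq, beq_iff_eq]
  constructor
  · rintro ⟨p, hp, h⟩; exact ⟨p, hp, h.symm⟩
  · rintro ⟨p, hp, h⟩; exact ⟨p, hp, h.symm⟩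

-- counter size = number of distinct elements
theorem pv_counter_size {α : Type} [BEq α] [LawfulBEq α] (xs : List α) :
    ((PySem.Dict.counter xs).size : Int) = ((PySem.Set.ofList xs).length : Int) := by
  have : (PySem.Dict.counter xs).size = (PySem.Dict.counter xs).items.length := rfl
  rw [this, PySem.Dict.items_counter, List.length_map]

-- ===== VERDICT (by name: the statement is the Claim_ definition above) =====
theorem calculate_accuracy_varying_lengths_spec : Claim_equal_calculate_accuracy_varying_lengths := by
  intro gt pred rd _
  unfold Spec_calculate_accuracy_varying_lengths
  unfold calculate_accuracy_varying_lengths calculate_accuracy_varying_lengths_alt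
  simp only [pvCounter, PySem.Dict.foldl_insert_getD_add_one_eq_counter]
  simp only [pv_component, pv_counter_size]
  congr 1
  · -- correct_triplet_cnt
    congr 1
    split_ifs with h
    · -- dedup branch: filtered keys vs set intersection
      rw [PySem.Dict.keys_counter]
      simp only [PySem.Set.inter, PySem.Dict.contains_counter]
      congr 2
      refine List.filter_congr ?_
      intro t _
      simp [PySem.Set.mem_ofList]
    · -- non-dedup branch: A's fold vs B's multiplicity sum
      rw [pv_sum_counter]
      have h : (fun (acc : Int) (predt : String × String × String) => if predt ∈ gt then acc + 1 else acc)
          = (fun acc predt => if (fun t => decide (t ∈ gt)) predt = true then acc + 1 else acc) := by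
        funext acc p; simp
      rw [h, PySem.List.foldl_count_if]
      simp only [zero_add, Int.natCast_inj]
      refine List.countP_congr ?_
      intro t _
      simp [PySem.Dict.contains_counter]
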